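-- pv_equiv track=rewrite | github.com/shameme97/A-Variation-of-Simplex-Algorithm | main.py | initial_basic_variables
-- ===== SOURCE A (Python) =====
-- def initial_basic_variables(top, var, cons):
--     basic = []
--     for i in range(1, var + cons + 1):
--         if i not in top:
--             if i <= cons:
--                 basic.append(i + var)
--             else:
--                 basic.append(i - cons)
--     basic.sort()
--     non_basic = []
--     for i in range(1, var + cons + 1):
--         if i not in basic:
--             non_basic.append(i)
--     return basic, non_basic
-- ===== SOURCE B (Python) =====
-- def initial_basic_variables(top, var, cons):
--     tops = set(top)
--     basic = []
--     non_basic = []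
--     for i in range(1, var + cons + 1):
--         value = i + var if i <= cons else i - cons
--         if i in tops:
--             non_basic.append(value)
--         else:
--             basic.append(value)
--     basic.sort()
--     non_basic.sort()
--     return basic, non_basic
-- ===== Notes on version B (the rewrite author's own statement) =====
-- stated objective: faster
-- what changed: Single pass over range(1, var+cons+1) that routes each mapped value i+var/i-cons directly into basic or non_basic by testing i against top (the map is a bijection of the range, so the top-images are exactly the complement of basic), then sorts both lists; this removes A's second full scan with a membership test against the basic list.
-- outside the precondition, e.g. on initial_basic_variables([], 5, -1): A returns ([2, 3, 4, 5], [1]), B returns ([2, 3, 4, 5], [])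
import Mathlib
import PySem

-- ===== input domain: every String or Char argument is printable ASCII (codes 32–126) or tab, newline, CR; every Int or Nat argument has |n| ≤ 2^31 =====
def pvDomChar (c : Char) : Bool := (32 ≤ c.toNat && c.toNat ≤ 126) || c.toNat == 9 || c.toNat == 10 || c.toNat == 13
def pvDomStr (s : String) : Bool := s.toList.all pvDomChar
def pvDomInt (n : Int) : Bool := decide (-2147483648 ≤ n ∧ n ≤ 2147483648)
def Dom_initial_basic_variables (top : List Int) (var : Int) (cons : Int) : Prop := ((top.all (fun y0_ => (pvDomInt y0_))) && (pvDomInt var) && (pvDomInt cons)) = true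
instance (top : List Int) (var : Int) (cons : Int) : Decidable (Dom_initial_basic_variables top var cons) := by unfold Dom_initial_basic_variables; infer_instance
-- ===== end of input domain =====

-- B builds non_basic directly in the same single pass that builds basic (f is a bijection on the
-- index range, so the top-indices' images are exactly the complement of basic), then sorts both,
-- instead of A's second full scan with a membership test against basic. Objective: faster.

-- ===== PORT A =====
def initial_basic_variables (top : List Int) (var : Int) (cons : Int) : List Int × List Int :=
  let basic :=
    (PySem.List.pyRange 1 (var + cons + 1) 1).foldl
      (fun acc i =>
        if i ∈ top then acc
        else if i ≤ cons then acc ++ [i + var] else acc ++ [i - cons]) []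
  let basic := PySem.List.sorted basic (fun x => x)
  let non_basic :=
    (PySem.List.pyRange 1 (var + cons + 1) 1).foldl
      (fun acc i => if i ∈ basic then acc else acc ++ [i]) []
  (basic, non_basic)

-- ===== PORT B =====
def initial_basic_variables_alt (top : List Int) (var : Int) (cons : Int) : List Int × List Int :=
  let tops : PySem.Set Int := PySem.Set.ofList top
  let p :=
    (PySem.List.pyRange 1 (var + cons + 1) 1).foldl
      (fun (acc : List Int × List Int) i =>
        let value := if i ≤ cons then i + var else i - cons
        if i ∈ tops then (acc.1, acc.2 ++ [value]) else (acc.1 ++ [value], acc.2))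
      ([], [])
  (PySem.List.sorted p.1 (fun x => x), PySem.List.sorted p.2 (fun x => x))

-- ===== PRECONDITION & SPEC =====
-- Pre_ restricts to the natural simplex domain (nonnegative variable/constraint counts); on
-- negative counts the index map is no longer a bijection of the range and A's complement scan
-- yields values B does not mimic.
def Pre_initial_basic_variables (top : List Int) (var : Int) (cons : Int) : Prop :=
  (0 ≤ var ∧ 0 ≤ cons) ∨ var + cons ≤ 0
instance (top : List Int) (var : Int) (cons : Int) : Decidable (Pre_initial_basic_variables top var cons) := by unfold Pre_initial_basic_variables; infer_instance
def pvWitness_initial_basic_variables : List Int × Int × Int := ([1], 2, 1)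

def Spec_initial_basic_variables (top : List Int) (var : Int) (cons : Int) (out : List Int × List Int) : Prop := out = initial_basic_variables_alt top var cons
instance (top : List Int) (var : Int) (cons : Int) (out : List Int × List Int) : Decidable (Spec_initial_basic_variables top var cons out) := by unfold Spec_initial_basic_variables; infer_instance

-- ===== CLAIM (what is proved, stated in full; the proofs are below) =====
def Claim_equal_initial_basic_variables : Prop := ∀ (top : List Int) (var : Int) (cons : Int), Dom_initial_basic_variables top var cons → Pre_initial_basic_variables top var cons → Spec_initial_basic_variables top var cons (initial_basic_variables top var cons)

-- ===== LEMMAS AND PROOFS =====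

-- inverted shape of PySem.List.foldl_append_if: 'if p x then skip else append (f x)'
theorem foldl_skip_if {α β : Type} (p : α → Bool) (f : α → β) (l : List α) (acc : List β) :
    l.foldl (fun acc x => if p x then acc else acc ++ [f x]) acc
      = acc ++ (l.filter (fun x => !p x)).map f := by
  have h : (fun (acc : List β) x => if p x then acc else acc ++ [f x])
      = (fun acc x => if !p x then acc ++ [f x] else acc) := by
    funext a x; cases p x <;> simp
  rw [h, PySem.List.foldl_append_if]

-- the index map i ↦ (i+var if i ≤ cons else i-cons) permutes the range 1..var+cons
theorem mapf_perm (var cons : Int) (h1 : 0 ≤ var) (h2 : 0 ≤ cons) :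
    ((PySem.List.pyRange 1 (var + cons + 1) 1).map
        (fun i => if i ≤ cons then i + var else i - cons)).Perm
      (PySem.List.pyRange 1 (var + cons + 1) 1) := by
  have hsplit : PySem.List.pyRange 1 (var + cons + 1) 1
      = PySem.List.pyRange 1 (cons + 1) 1 ++ PySem.List.pyRange (cons + 1) (var + cons + 1) 1 :=
    PySem.List.pyRange_one_append 1 (cons + 1) (var + cons + 1) (by omega) (by omega)
  nth_rewrite 1 [hsplit]
  rw [List.map_append]
  have ha : (PySem.List.pyRange 1 (cons + 1) 1).map
      (fun i => if i ≤ cons then i + var else i - cons)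
      = PySem.List.pyRange (var + 1) (var + cons + 1) 1 := by
    rw [PySem.List.pyRange_one 1 (cons + 1), PySem.List.pyRange_one (var + 1) (var + cons + 1),
      List.map_map]
    have hlen : (cons + 1 - 1).toNat = (var + cons + 1 - (var + 1)).toNat := by omega
    rw [hlen]
    apply List.map_congr_left
    intro k hk
    rw [List.mem_range] at hk
    have hkc : (1 : Int) + k ≤ cons := by omega
    simp [hkc]; omega
  have hb : (PySem.List.pyRange (cons + 1) (var + cons + 1) 1).map
      (fun i => if i ≤ cons then i + var else i - cons)
      = PySem.List.pyRange 1 (var + 1) 1 := by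
    rw [PySem.List.pyRange_one (cons + 1) (var + cons + 1), PySem.List.pyRange_one 1 (var + 1),
      List.map_map]
    have hlen : (var + cons + 1 - (cons + 1)).toNat = (var + 1 - 1).toNat := by omega
    rw [hlen]
    apply List.map_congr_left
    intro k hk
    rw [List.mem_range] at hk
    have hkc : ¬ (cons + 1 + (k : Int) ≤ cons) := by omega
    simp [hkc]; omega
  rw [ha, hb]
  refine List.perm_append_comm.trans ?_
  rw [← PySem.List.pyRange_one_append 1 (var + 1) (var + cons + 1) (by omega) (by omega)]

-- ===== VERDICT (by name: the statement is the Claim_ definition above) =====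
theorem initial_basic_variables_spec : Claim_equal_initial_basic_variables := by
  intro top var cons _hdom hpre
  rcases hpre with ⟨h1, h2⟩ | hneg
  case inr =>
    -- empty index range: both programs return ([], [])
    unfold Spec_initial_basic_variables initial_basic_variables initial_basic_variables_alt
    rw [PySem.List.pyRange_one_eq_nil (by omega)]
    simp [PySem.List.sorted]
  unfold Spec_initial_basic_variables initial_basic_variables initial_basic_variables_alt
  dsimp only
  set R := PySem.List.pyRange 1 (var + cons + 1) 1 with hR
  set f : Int → Int := fun i => if i ≤ cons then i + var else i - cons with hf
  set q : Int → Bool := fun i => decide (i ∈ top) with hq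
  -- identify A's first loop
  have hA1 : R.foldl
      (fun acc i => if i ∈ top then acc
        else if i ≤ cons then acc ++ [i + var] else acc ++ [i - cons]) ([] : List Int)
      = (R.filter (fun i => !q i)).map f := by
    have hfun : (fun (acc : List Int) i => if i ∈ top then acc
        else if i ≤ cons then acc ++ [i + var] else acc ++ [i - cons])
        = (fun acc i => if q i then acc else acc ++ [f i]) := by
      funext a i
      by_cases hm : i ∈ top <;> by_cases hc : i ≤ cons <;> simp [hq, hf, hm, hc]
    rw [hfun, foldl_skip_if]
    simp
  -- identify B's loop
  have hB : R.foldl (fun (acc : List Int × List Int) i =>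
        let value := if i ≤ cons then i + var else i - cons
        if i ∈ PySem.Set.ofList top then (acc.1, acc.2 ++ [value]) else (acc.1 ++ [value], acc.2))
        (([] : List Int), ([] : List Int))
      = ((R.filter (fun i => !q i)).map f, (R.filter q).map f) := by
    have hfun : (fun (acc : List Int × List Int) i =>
        let value := if i ≤ cons then i + var else i - cons
        if i ∈ PySem.Set.ofList top then (acc.1, acc.2 ++ [value]) else (acc.1 ++ [value], acc.2))
        = (fun acc i => (if q i then acc.1 else acc.1 ++ [f i],
                         if q i then acc.2 ++ [f i] else acc.2)) := by
      funext a i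
      by_cases hm : i ∈ top <;> simp [hq, hf, hm, PySem.Set.mem_ofList]
    rw [hfun,
      PySem.List.foldl_prod_mk (f := fun (a : List Int) i => if q i then a else a ++ [f i])
        (g := fun (a : List Int) i => if q i then a ++ [f i] else a),
      foldl_skip_if, PySem.List.foldl_append_if]
    simp
  rw [hA1, hB]
  -- both 'basic' components are now literally equal; prove the 'non_basic' components equal
  refine Prod.ext rfl ?_
  simp only
  -- facts about the pieces
  have hRnd : R.Nodup := PySem.List.nodup_pyRange_one _ _
  have hperm := mapf_perm var cons h1 h2
  rw [← hR, ← hf] at hperm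
  have hsplitperm : ((R.filter q).map f ++ (R.filter (fun i => !q i)).map f).Perm R := by
    rw [← List.map_append]
    exact ((List.filter_append_perm q R).map f).trans hperm
  have happnd : ((R.filter q).map f ++ (R.filter (fun i => !q i)).map f).Nodup :=
    (hsplitperm.nodup_iff).mpr hRnd
  have hdisj := (List.nodup_append.mp happnd).2.2
  -- membership characterisation: for x, x ∈ sorted-basic ↔ x ∈ basicU
  set basicU := (R.filter (fun i => !q i)).map f with hbU
  set L := (R.filter q).map f with hL
  -- the filtered complement is a strictly increasing rearrangement of L
  have key : R.filter (fun i => !decide (i ∈ PySem.List.sorted basicU (fun x => x))) =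
      PySem.List.sorted L (fun x => x) := by
    symm
    apply PySem.List.sorted_eq_of_perm_of_pairwise_lt
    · rw [List.perm_ext_iff_of_nodup (hRnd.filter _) (List.nodup_append.mp happnd).1]
      intro x
      constructor
      · intro hx
        rw [List.mem_filter] at hx
        obtain ⟨hxR, hxnb⟩ := hx
        have hxnb' : x ∉ basicU := by
          intro hc
          rw [← PySem.List.mem_sorted (key := fun x => x) (rev := false)] at hc
          simp [hc] at hxnb
        have hcov : x ∈ L ++ basicU := hsplitperm.mem_iff.mpr hxR
        rw [List.mem_append] at hcov
        tauto
      · intro hx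
        have hxR : x ∈ R := hsplitperm.mem_iff.mp (List.mem_append.mpr (Or.inl hx))
        have hxnb : x ∉ basicU := fun hc => hdisj x hx x hc rfl
        rw [List.mem_filter]
        refine ⟨hxR, ?_⟩
        simp only [Bool.not_eq_eq_eq_not, Bool.not_true, decide_eq_false_iff_not]
        rw [PySem.List.mem_sorted]
        exact hxnb
    · exact List.Pairwise.filter _ (PySem.List.pairwise_lt_pyRange_one _ _)
  rw [← key]
  -- A's second loop is that filter
  have hfilt := PySem.List.foldl_append_if_eq_filter
    (p := fun i => !decide (i ∈ PySem.List.sorted basicU (fun x => x))) (l := R)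
    (acc := ([] : List Int))
  have hfun2 : (fun (acc : List Int) i =>
      if i ∈ PySem.List.sorted basicU (fun x => x) then acc else acc ++ [i])
      = (fun acc i => if (!decide (i ∈ PySem.List.sorted basicU (fun x => x))) = true
          then acc ++ [i] else acc) := by
    funext a i
    by_cases hm : i ∈ PySem.List.sorted basicU (fun x => x) <;> simp [hm]
  rw [hfun2, hfilt]
  simp
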